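-- pv_equiv track=rewrite | github.com/lgo33/wr17-python-workshop | ranking.py | find_two_pairs
-- ===== SOURCE A (Python) =====
-- from collections import defaultdict, OrderedDict, Counter
--
-- def parse_cards(cards):
--     rank = {
--         '1': 10,
--         'J': 11,
--         'Q': 12,
--         'K': 13,
--         'A': 14
--     }
--     return sorted([(int(rank.get(c[0], (c[0]))), c[-1]) for c in cards], key=lambda x: -x[0])
--
-- def parse_and_count_cards(cards):
--     pc = parse_cards(cards)
--     count = OrderedDict()
--     for c in pc:
--         try:
--             count[c[0]] += 1
--         except KeyError:
--             count[c[0]] = 1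
--     return pc, count
--
-- def find_two_pairs(cards):
--     """If *cards* contain (at least) two pairs, return a triple
--     (rank of highest pair, rank of second highest pair, rank of the highest other card)
--     If there is no other card, because len(cards) == 4, then just return the pairs' ranks.
--
--     If no two pairs are found, return None.
--     """
--     pc, count = parse_and_count_cards(cards)
--     pairs = []
--     for rank in count:
--         if count[rank] == 2:
--             pairs.append(rank)
--         if len(pairs) == 2:
--             break
--     if len(pairs) < 2:
--         return None
--     return pairs + [card[0] for card in pc if card[0] not in pairs][:1]
-- ===== SOURCE B (Python) =====
-- def find_two_pairs(cards):
--     rank = {'1': 10, 'J': 11, 'Q': 12, 'K': 13, 'A': 14}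
--     pc = sorted([(int(rank.get(c[0], c[0])), c[-1]) for c in cards], key=lambda x: -x[0])
--     ranks = [p[0] for p in pc]
--     pairs = []
--     i, n = 0, len(ranks)
--     while i < n and len(pairs) < 2:
--         j = i + 1
--         while j < n and ranks[j] == ranks[i]:
--             j += 1
--         if j - i == 2:
--             pairs.append(ranks[i])
--         i = j
--     if len(pairs) < 2:
--         return None
--     for r in ranks:
--         if r not in pairs:
--             return pairs + [r]
--     return pairs
-- ===== Notes on version B (the rewrite author's own statement) =====
-- stated objective: alternative
-- what changed: B replaces A's OrderedDict counting pass plus dict-key iteration with a single run-length scan over the descending sorted rank list (a run of length exactly 2 is a pair, stopping after two), and replaces A's filter-then-slice kicker comprehension with a find-first loop.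
import Mathlib
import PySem

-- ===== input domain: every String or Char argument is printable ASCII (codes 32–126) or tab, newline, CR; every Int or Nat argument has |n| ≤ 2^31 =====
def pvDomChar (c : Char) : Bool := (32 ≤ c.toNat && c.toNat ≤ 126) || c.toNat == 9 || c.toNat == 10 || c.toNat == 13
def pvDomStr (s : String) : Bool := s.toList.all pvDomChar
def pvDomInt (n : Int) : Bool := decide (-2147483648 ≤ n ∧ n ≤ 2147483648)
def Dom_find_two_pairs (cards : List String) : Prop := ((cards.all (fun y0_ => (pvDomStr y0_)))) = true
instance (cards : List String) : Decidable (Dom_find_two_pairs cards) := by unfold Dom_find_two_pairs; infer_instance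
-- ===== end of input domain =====

-- B replaces A's OrderedDict counting pass and key iteration by a single run-length scan
-- over the descending sorted rank list plus a find-first kicker scan (objective: alternative).
-- Both implementations only read their argument; neither mutates it.

-- ===== PORT A =====

-- the module-level rank dict (keys are the one-character strings c[0]; Char here since indexing a string yields a char)
def pvRankMap : PySem.Dict Char Int :=
  PySem.Dict.ofList [('1', 10), ('J', 11), ('Q', 12), ('K', 13), ('A', 14)]

-- (int(rank.get(c[0], c[0])), c[-1]); total via getD — Pre_ guarantees c is nonempty and int() succeeds
def pvParseCard (c : String) : Int × Char :=
  let h := (PySem.Str.pyGet? c 0).getD ' '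
  let v : Int :=
    match pvRankMap.get? h with
    | some v => v                                   -- int(n) of an int is n
    | none => (PySem.Int.ofStr? (String.mk [h])).getD 0
  (v, (PySem.Str.pyGet? c (-1)).getD ' ')

def parse_cards (cards : List String) : List (Int × Char) :=
  PySem.List.sorted (cards.map pvParseCard) (fun x => -x.1)

def parse_and_count_cards (cards : List String) :
    List (Int × Char) × PySem.Dict Int Int :=
  let pc := parse_cards cards
  -- try: count[c[0]] += 1 / except KeyError: count[c[0]] = 1
  (pc, pc.foldl (fun d c => d.modify c.1 0 (· + 1)) PySem.Dict.empty)

-- for rank in count: if count[rank] == 2: pairs.append(rank); if len(pairs) == 2: break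
def pvPairsLoop (count : PySem.Dict Int Int) : List Int → List Int → List Int
  | [], pairs => pairs
  | r :: rest, pairs =>
    let pairs := if count.getD r 0 == 2 then pairs ++ [r] else pairs
    if pairs.length == 2 then pairs else pvPairsLoop count rest pairs

def find_two_pairs (cards : List String) : Option (List Int) :=
  let pcc := parse_and_count_cards cards
  let pc := pcc.1
  let count := pcc.2
  let pairs := pvPairsLoop count count.keys []
  if pairs.length < 2 then none
  else
    some (pairs ++
      PySem.List.slice ((pc.filter (fun card => !(pairs.contains card.1))).map (·.1))
        none (some 1))

-- ===== PORT B =====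

def pvRankMapB : PySem.Dict Char Int :=
  PySem.Dict.ofList [('1', 10), ('J', 11), ('Q', 12), ('K', 13), ('A', 14)]

def pvParseCardB (c : String) : Int × Char :=
  let h := (PySem.Str.pyGet? c 0).getD ' '
  let v : Int :=
    match pvRankMapB.get? h with
    | some v => v
    | none => (PySem.Int.ofStr? (String.mk [h])).getD 0
  (v, (PySem.Str.pyGet? c (-1)).getD ' ')

-- while i < n and len(pairs) < 2: advance j over the run of ranks[i]; append if the run is exactly 2
def pvRunScan : List Int → List Int → List Int
  | [], pairs => pairs
  | r :: rest, pairs =>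
    if pairs.length < 2 then
      let run : Int := 1 + ((rest.takeWhile (· == r)).length : Int)   -- j - i
      pvRunScan (rest.dropWhile (· == r)) (if run == 2 then pairs ++ [r] else pairs)
    else pairs
termination_by ranks _ => ranks.length
decreasing_by
  simpa using Nat.lt_succ_of_le (List.length_dropWhile_le _ _)

def find_two_pairs_alt (cards : List String) : Option (List Int) :=
  let pc := PySem.List.sorted (cards.map pvParseCardB) (fun x => -x.1)
  let ranks := pc.map (·.1)
  let pairs := pvRunScan ranks []
  if pairs.length < 2 then none
  else
    -- for r in ranks: if r not in pairs: return pairs + [r]  /  return pairs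
    match ranks.find? (fun r => !(pairs.contains r)) with
    | some r => some (pairs ++ [r])
    | none => some pairs

-- ===== PRECONDITION & SPEC =====
-- Pre_ excludes exactly the inputs on which A raises: an empty card string (IndexError on c[0])
-- or a card whose first character is neither a digit nor one of 'J','Q','K','A' (ValueError in int()).
def Pre_find_two_pairs (cards : List String) : Prop :=
  ∀ c ∈ cards, c.toList ≠ [] ∧
    (PySem.Chars.isdigit c.toList.headI = true ∨ c.toList.headI = 'J' ∨
     c.toList.headI = 'Q' ∨ c.toList.headI = 'K' ∨ c.toList.headI = 'A')
instance (cards : List String) : Decidable (Pre_find_two_pairs cards) := by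
  unfold Pre_find_two_pairs; infer_instance

def pvWitness_find_two_pairs : List String := ["2H", "2D", "5S", "5C", "9H"]

def Spec_find_two_pairs (cards : List String) (out : Option (List Int)) : Prop :=
  out = find_two_pairs_alt cards
instance (cards : List String) (out : Option (List Int)) :
    Decidable (Spec_find_two_pairs cards out) := by
  unfold Spec_find_two_pairs; infer_instance

-- ===== CLAIM (what is proved, stated in full; the proofs are below) =====
def Claim_equal_find_two_pairs : Prop :=
  ∀ (cards : List String), Dom_find_two_pairs cards → Pre_find_two_pairs cards →
    Spec_find_two_pairs cards (find_two_pairs cards)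

-- ===== LEMMAS AND PROOFS =====

theorem discard_of_not_mem (s : List Int) (r : Int) (h : r ∉ s) :
    PySem.Set.discard s r = s := by
  simp only [PySem.Set.discard]
  exact List.filter_eq_self.mpr (fun y hy => by
    have hne : y ≠ r := fun e => h (e ▸ hy)
    simp [hne])

theorem ofList_decomp (r : Int) (t tail : List Int)
    (ht : ∀ x ∈ t, x = r) (htail : r ∉ tail) :
    PySem.Set.ofList (r :: (t ++ tail)) = r :: PySem.Set.ofList tail := by
  induction t with
  | nil =>
    rw [List.nil_append, PySem.Set.ofList_cons]
    have : r ∉ PySem.Set.ofList tail := fun h => htail ((PySem.Set.mem_ofList tail r).mp h)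
    rw [discard_of_not_mem _ _ this]
  | cons a t' ih =>
    have ha : a = r := ht a (by simp)
    rw [ha]
    have ih' := ih (fun x hx => ht x (by simp [hx]))
    rw [List.cons_append, PySem.Set.ofList_cons, ih']
    have hne : r ∉ PySem.Set.ofList tail := fun h => htail ((PySem.Set.mem_ofList tail r).mp h)
    have hstep : PySem.Set.discard (r :: PySem.Set.ofList tail) r =
        PySem.Set.discard (PySem.Set.ofList tail) r := by
      simp [PySem.Set.discard]
    rw [hstep, discard_of_not_mem _ _ hne]

theorem runScan_stop (ranks pairs : List Int) (h : ¬ pairs.length < 2) :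
    pvRunScan ranks pairs = pairs := by
  cases ranks with
  | nil => simp [pvRunScan]
  | cons r rest => simp [pvRunScan, h]

theorem scan_loop_eq (count : PySem.Dict Int Int) (ranks pairs : List Int)
    (hs : ranks.Pairwise (fun a b => b ≤ a))
    (hc : ∀ k ∈ ranks, count.getD k 0 = (ranks.count k : Int))
    (hp : pairs.length < 2) :
    pvRunScan ranks pairs = pvPairsLoop count (PySem.Set.ofList ranks) pairs := by
  match ranks, hs, hc with
  | [], _, _ =>
    simp [pvRunScan, PySem.Set.ofList, pvPairsLoop]
  | r :: rest, hs, hc =>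
    have hall : ∀ x ∈ rest, x ≤ r := (List.pairwise_cons.mp hs).1
    have hsrest : rest.Pairwise (fun a b => b ≤ a) := (List.pairwise_cons.mp hs).2
    set t := rest.takeWhile (· == r) with hT
    set tail := rest.dropWhile (· == r) with hD
    have hrest : t ++ tail = rest := List.takeWhile_append_dropWhile
    have ht : ∀ x ∈ t, x = r := fun x hx => by
      have := List.mem_takeWhile_imp hx; simpa using this
    have hptail : tail.Pairwise (fun a b => b ≤ a) :=
      List.Pairwise.sublist (by rw [hD]; exact List.dropWhile_sublist _) hsrest
    have htail : r ∉ tail := by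
      intro hmem
      cases hdl : tail with
      | nil => rw [hdl] at hmem; exact (List.not_mem_nil).elim hmem
      | cons x xs =>
        have hx : (x == r) = false := by
          have := List.head?_dropWhile_not (· == r) rest
          rw [← hD, hdl] at this; simpa using this
        have hxr : x ≠ r := by simpa using hx
        have hxler : x ≤ r := hall x (by
          rw [← hrest]; exact List.mem_append_right _ (by rw [hdl]; simp))
        have hxlt : x < r := lt_of_le_of_ne hxler hxr
        rw [hdl] at hmem hptail
        rcases List.mem_cons.mp hmem with h1 | h1
        · exact hxr h1.symm
        · have : r ≤ x := (List.pairwise_cons.mp hptail).1 r h1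
          exact absurd this (not_le.mpr hxlt)
    have htcount : t.count r = t.length := List.count_eq_length.mpr (fun b hb => (ht b hb).symm)
    have htailcount : tail.count r = 0 := List.count_eq_zero.mpr htail
    have hcr : count.getD r 0 = 1 + (t.length : Int) := by
      have := hc r (by simp)
      rw [this, List.count_cons_self, ← hrest, List.count_append, htcount, htailcount]
      push_cast; ring
    have hofl : PySem.Set.ofList (r :: rest) = r :: PySem.Set.ofList tail := by
      rw [← hrest]; exact ofList_decomp r t tail ht htail
    -- unfold one step of each loop
    rw [hofl]
    show pvRunScan (r :: rest) pairs = pvPairsLoop count (r :: PySem.Set.ofList tail) pairs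
    rw [pvRunScan, pvPairsLoop]
    simp only [hp, if_true, ← hT, ← hD]
    have hcond : (count.getD r 0 == 2) = ((1 + (t.length : Int)) == 2) := by rw [hcr]
    rw [hcond]
    set pairs' := if (1 + (t.length : Int)) == 2 then pairs ++ [r] else pairs with hP
    have hlen' : pairs'.length ≤ pairs.length + 1 := by
      rw [hP]; split <;> simp
    by_cases h2 : pairs'.length = 2
    · simp only [h2, beq_self_eq_true, if_true]
      exact runScan_stop tail pairs' (by omega)
    · have hb2 : (pairs'.length == 2) = false := by simpa using h2
      rw [hb2]
      simp only [Bool.false_eq_true, if_false]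
      have hc' : ∀ k ∈ tail, count.getD k 0 = (tail.count k : Int) := by
        intro k hk
        have hkr : k ≠ r := fun e => htail (e ▸ hk)
        have hkranks : k ∈ r :: rest := by
          refine List.mem_cons_of_mem _ ?_
          rw [← hrest]; exact List.mem_append_right _ hk
        have := hc k hkranks
        rw [this]
        have h1 : (r :: rest).count k = rest.count k := by
          rw [List.count_cons, if_neg (by simpa using fun e => hkr e.symm)]
          omega
        have h2' : rest.count k = tail.count k := by
          rw [← hrest, List.count_append, List.count_eq_zero.mpr (fun hmem => hkr ((ht k hmem)))]
          omega
        rw [h1, h2']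
      exact scan_loop_eq count tail pairs' hptail hc' (by omega)
termination_by ranks.length
decreasing_by
  simp only [← hD]
  simpa using Nat.lt_succ_of_le (List.length_dropWhile_le _ _)

theorem kicker_eq (pc : List (Int × Char)) (pairs : List Int) :
    ((pc.filter (fun card => !(pairs.contains card.1))).map (·.1)).take 1 =
      (match (pc.map (·.1)).find? (fun r => !(pairs.contains r)) with
       | some r => [r] | none => []) := by
  induction pc with
  | nil => simp
  | cons c rest ih =>
    by_cases h : c.1 ∈ pairs
    · simpa [h] using ih
    · simp [h]

theorem count_eq_counter (pc : List (Int × Char)) :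
    pc.foldl (fun d c => d.modify c.1 0 (· + 1)) PySem.Dict.empty =
      PySem.Dict.counter (pc.map (·.1)) := by
  rw [PySem.Dict.counter_eq_foldl, List.foldl_map]

-- ===== VERDICT (by name: the statement is the Claim_ definition above) =====
theorem find_two_pairs_spec : Claim_equal_find_two_pairs := by
  intro cards _ _
  unfold Spec_find_two_pairs find_two_pairs find_two_pairs_alt parse_and_count_cards parse_cards
  have hparse : pvParseCardB = pvParseCard := rfl
  rw [hparse]
  set pc := PySem.List.sorted (cards.map pvParseCard) (fun x => -x.1) with hpc
  set ranks := pc.map (·.1) with hranks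
  have hsorted : ranks.Pairwise (fun a b => b ≤ a) := by
    rw [hranks, List.pairwise_map]
    exact (PySem.List.sorted_pairwise (cards.map pvParseCard) (fun x => -x.1)).imp
      (fun {a b} h => by omega)
  have hcnt := count_eq_counter pc
  simp only [hcnt, PySem.Dict.keys_counter]
  have hloop : pvPairsLoop (PySem.Dict.counter ranks) (PySem.Set.ofList ranks) [] =
      pvRunScan ranks [] := by
    exact (scan_loop_eq (PySem.Dict.counter ranks) ranks [] hsorted
      (fun k _ => PySem.Dict.getD_counter ranks k) (by simp)).symm
  rw [← hranks, hloop]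
  set pairs := pvRunScan ranks [] with hpairs
  by_cases hlt : pairs.length < 2
  · simp [hlt]
  · simp only [hlt, if_false]
    rw [PySem.List.slice_to _ (by omega)]
    have h1 : (1 : Int).toNat = 1 := rfl
    rw [h1, kicker_eq pc pairs]
    show (some (pairs ++ _) : Option (List Int)) = _
    rw [← hranks]
    cases h : ranks.find? (fun r => !(pairs.contains r)) with
    | none => simp
    | some r => simp
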